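-- pv_equiv track=rewrite | github.com/callumg2895/AdventOfCodeSolutions | 2018 Solutions/day_2_solutions.py | get_addition
-- ===== SOURCE A (Python) =====
-- def get_addition(string, x):
--
--         letter_counts_dict = dict({})
--
--         for letter in string:
--
--                 if letter in letter_counts_dict:
--                         letter_counts_dict[letter] += 1
--                 else:
--                         letter_counts_dict[letter] = 1
--
--         return 1 if (x in letter_counts_dict.values()) else 0
-- ===== SOURCE B (Python) =====
-- def get_addition(string, x):
--     s = sorted(string)
--     i = 0
--     n = len(s)
--     while i < n:
--         j = i + 1
--         while j < n and s[j] == s[i]: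
--             j += 1
--         if j - i == x:
--             return 1
--         i = j
--     return 0
-- ===== Notes on version B (the rewrite author's own statement) =====
-- stated objective: alternative
-- what changed: B sorts the string and scans consecutive equal-letter runs, returning 1 when a run length equals x, instead of building a hash-table of letter counts and searching its values.
import Mathlib
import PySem

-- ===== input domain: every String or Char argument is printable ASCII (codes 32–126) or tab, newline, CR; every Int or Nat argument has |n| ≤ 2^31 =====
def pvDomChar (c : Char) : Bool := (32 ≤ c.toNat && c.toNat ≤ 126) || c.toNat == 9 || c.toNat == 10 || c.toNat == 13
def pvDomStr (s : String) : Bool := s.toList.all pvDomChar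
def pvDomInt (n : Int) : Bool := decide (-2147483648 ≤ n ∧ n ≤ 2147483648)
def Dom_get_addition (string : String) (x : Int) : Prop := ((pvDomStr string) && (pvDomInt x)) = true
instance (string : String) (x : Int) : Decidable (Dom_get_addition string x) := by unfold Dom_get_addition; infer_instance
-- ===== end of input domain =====

-- B sorts the string and scans consecutive equal-letter runs instead of building a dict of counts; same values, no speed claim.

-- ===== PORT A =====
def get_addition (string : String) (x : Int) : Int :=
  let letter_counts_dict : PySem.Dict Char Int :=
    string.toList.foldl
      (fun d letter =>
        if d.contains letter then d.insert letter (d.getD letter 0 + 1)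
        else d.insert letter 1)
      PySem.Dict.empty
  if letter_counts_dict.values.contains x then 1 else 0

-- ===== PORT B =====
def scanRuns : List Char → Int → Int
  | [], _ => 0
  | c :: rest, x =>
    let run := rest.takeWhile (· == c)
    if ((run.length : Int) + 1) = x then 1
    else scanRuns (rest.dropWhile (· == c)) x
termination_by l _ => l.length
decreasing_by
  have := List.length_dropWhile_le (· == c) rest
  simp only [List.length_cons]; omega

def get_addition_alt (string : String) (x : Int) : Int :=
  scanRuns (PySem.List.sorted string.toList (fun c => c) false) x

-- ===== PRECONDITION & SPEC =====
def Spec_get_addition (string : String) (x : Int) (out : Int) : Prop := out = get_addition_alt string x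
instance (string : String) (x : Int) (out : Int) : Decidable (Spec_get_addition string x out) := by unfold Spec_get_addition; infer_instance

-- ===== CLAIM (what is proved, stated in full; the proofs are below) =====
def Claim_equal_get_addition : Prop := ∀ (string : String) (x : Int), Dom_get_addition string x → Spec_get_addition string x (get_addition string x)

-- ===== LEMMAS AND PROOFS =====

-- A's value: 1 iff some letter of the string occurs exactly x times
theorem getA_eq (l : List Char) (x : Int) :
    (if ((l.foldl
      (fun d letter =>
        if d.contains letter then d.insert letter (d.getD letter 0 + 1)
        else d.insert letter 1)
      PySem.Dict.empty).values.contains x) then (1 : Int) else 0)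
    = if (∃ c ∈ l, (l.count c : Int) = x) then 1 else 0 := by
  have hfun : (fun (d : PySem.Dict Char Int) letter =>
      if d.contains letter then d.insert letter (d.getD letter 0 + 1)
      else d.insert letter 1)
      = fun (d : PySem.Dict Char Int) letter => d.insert letter (d.getD letter 0 + 1) := by
    funext d letter
    by_cases hc : d.contains letter = true
    · simp [hc]
    · have h0 : d.getD letter 0 = 0 :=
        d.getD_of_not_contains 0 (by simpa using hc)
      simp [hc, h0]
  rw [hfun, PySem.Dict.foldl_insert_getD_add_one_eq_counter,
    PySem.Dict.values_eq_map_keys _ (PySem.Dict.nodup_keys_counter _) 0]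
  simp only [PySem.Dict.keys_counter, PySem.Dict.getD_counter]
  have hiff : ((((PySem.Set.ofList l).map (fun k => (l.count k : Int))).contains x) = true)
      ↔ ∃ c ∈ l, (l.count c : Int) = x := by
    simp [List.mem_map, PySem.Set.mem_ofList, eq_comm]
  by_cases h : ∃ c ∈ l, (l.count c : Int) = x
  · rw [if_pos (hiff.mpr h), if_pos h]
  · rw [if_neg (fun hb => h (hiff.mp hb)), if_neg h]

-- c cannot recur after its run in a ≤-sorted tail
theorem not_mem_dropWhile_beq (c : Char) (rest : List Char)
    (hle : ∀ a ∈ rest, c ≤ a) (hpw : rest.Pairwise (· ≤ ·)) :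
    c ∉ rest.dropWhile (· == c) := by
  induction rest with
  | nil => simp
  | cons a rest ih =>
    by_cases hac : a = c
    · subst hac
      simp only [List.dropWhile_cons, beq_self_eq_true, if_pos]
      exact ih (fun b hb => hle b (List.mem_cons_of_mem _ hb)) hpw.of_cons
    · have hbeq : (a == c) = false := beq_eq_false_iff_ne.mpr hac
      rw [List.dropWhile_cons, hbeq]
      simp only [Bool.false_eq_true, if_false, List.mem_cons, not_or]
      refine ⟨fun hh => hac hh.symm, fun hcr => ?_⟩
      have h1 : c ≤ a := hle a List.mem_cons_self
      have h2 : a ≤ c := (List.pairwise_cons.mp hpw).1 c hcr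
      exact hac (le_antisymm h2 h1)

theorem scanRuns_eq (l : List Char) (x : Int) (h : l.Pairwise (· ≤ ·)) :
    scanRuns l x = if (∃ c ∈ l, (l.count c : Int) = x) then 1 else 0 := by
  revert h
  induction l, x using scanRuns.induct with
  | case1 x => simp [scanRuns]
  | case2 c rest r =>
    intro h
    have hle : ∀ a ∈ rest, c ≤ a := (List.pairwise_cons.mp h).1
    have hnot : c ∉ rest.dropWhile (· == c) := not_mem_dropWhile_beq c rest hle h.of_cons
    have hcount : rest.count c = r.length := by
      conv_lhs => rw [← List.takeWhile_append_dropWhile (p := (· == c)) (l := rest)]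
      have hz : List.count c (rest.dropWhile (· == c)) = 0 := List.count_eq_zero.mpr hnot
      have hlen : List.count c (rest.takeWhile (· == c)) = (rest.takeWhile (· == c)).length :=
        List.count_eq_length.mpr (fun b hb => by
          have hb' := List.mem_takeWhile_imp hb; exact (eq_of_beq hb').symm)
      rw [List.count_append, hz, hlen]
      exact Nat.add_zero _
    have hex : ∃ c' ∈ c :: rest, ((c :: rest).count c' : Int) = (r.length : Int) + 1 :=
      ⟨c, List.mem_cons_self, by rw [List.count_cons_self, hcount]; push_cast; ring⟩
    rw [scanRuns]
    split_ifs with hif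
    · rfl
    · exact absurd rfl hif
  | case3 c rest x r hg ih =>
    intro h
    have hle : ∀ a ∈ rest, c ≤ a := (List.pairwise_cons.mp h).1
    have hpwd : (rest.dropWhile (· == c)).Pairwise (· ≤ ·) :=
      h.of_cons.sublist (List.dropWhile_sublist _)
    have hnot : c ∉ rest.dropWhile (· == c) := not_mem_dropWhile_beq c rest hle h.of_cons
    have hsplit : rest.takeWhile (· == c) ++ rest.dropWhile (· == c) = rest :=
      List.takeWhile_append_dropWhile
    have htall : ∀ b ∈ rest.takeWhile (· == c), b = c := fun b hb => by
      have hb' := List.mem_takeWhile_imp hb; exact eq_of_beq hb'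
    have hcountc : (c :: rest).count c = r.length + 1 := by
      rw [List.count_cons_self, ← hsplit, List.count_append,
        List.count_eq_zero.mpr hnot,
        List.count_eq_length.mpr (fun b hb => (htall b hb).symm)]
    have hcount' : ∀ c', c' ≠ c → (c :: rest).count c' = (rest.dropWhile (· == c)).count c' := by
      intro c' hc'
      rw [List.count_cons_of_ne (Ne.symm hc')]
      conv_lhs => rw [← hsplit]
      rw [List.count_append, List.count_eq_zero.mpr (fun hm => hc' (htall c' hm)), Nat.zero_add]
    have hiff : (∃ c' ∈ rest.dropWhile (· == c), ((rest.dropWhile (· == c)).count c' : Int) = x)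
        ↔ (∃ c' ∈ c :: rest, ((c :: rest).count c' : Int) = x) := by
      constructor
      · rintro ⟨c', hc', hcnt⟩
        have hcc : c' ≠ c := fun he => hnot (he ▸ hc')
        refine ⟨c', List.mem_cons_of_mem _ ?_, by rw [hcount' c' hcc]; exact hcnt⟩
        rw [← hsplit]; exact List.mem_append.mpr (Or.inr hc')
      · rintro ⟨c', hc', hcnt⟩
        by_cases hcc : c' = c
        · subst hcc
          rw [hcountc] at hcnt
          exact absurd (by rw [← hcnt]; push_cast; ring) hg
        · refine ⟨c', ?_, by rw [← hcount' c' hcc]; exact hcnt⟩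
          rcases List.mem_cons.mp hc' with h1 | h1
          · exact absurd h1 hcc
          · rcases List.mem_append.mpr (Or.inl h1) with _
            rcases List.mem_append.mp (by rw [hsplit]; exact h1) with h2 | h2
            · exact absurd (htall c' h2) hcc
            · exact h2
    rw [scanRuns]
    rw [if_neg (show ¬((((rest.takeWhile (· == c)).length : Int) + 1) = x) from hg), ih hpwd]
    by_cases h2 : ∃ c' ∈ c :: rest, ((c :: rest).count c' : Int) = x
    · rw [if_pos (hiff.mpr h2), if_pos h2]
    · rw [if_neg (fun hd => h2 (hiff.mp hd)), if_neg h2]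

-- ===== VERDICT (by name: the statement is the Claim_ definition above) =====
theorem get_addition_spec : Claim_equal_get_addition := by
  intro s x _
  unfold Spec_get_addition get_addition get_addition_alt
  rw [getA_eq, scanRuns_eq _ _ (by simpa using PySem.List.sorted_pairwise s.toList (fun c => c))]
  have hp : (PySem.List.sorted s.toList (fun c => c) false).Perm s.toList :=
    PySem.List.sorted_perm _ _ _
  congr 1
  apply propext
  constructor
  · rintro ⟨c, hc, hcount⟩
    exact ⟨c, hp.mem_iff.mpr hc, by rw [hp.count_eq]; exact hcount⟩
  · rintro ⟨c, hc, hcount⟩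
    exact ⟨c, hp.mem_iff.mp hc, by rw [← hp.count_eq]; exact hcount⟩
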